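-- pv_equiv track=rewrite | github.com/0general/coding-test | programmers/LV2/영어 끝말잇기.py | solution
-- ===== SOURCE A (Python) =====
-- def solution(n, words):
--     st = set()
--     for index in range(len(words)):
--         if index == 0:
--             st.add(words[index])
--         elif words[index-1][-1] == words[index][0] and words[index] not in st:
--             st.add(words[index])
--         else:
--             return [index % n+1, index//n + 1]
--     return [0, 0]
-- ===== SOURCE B (Python) =====
-- def solution(n, words):
--     breaks = [i for i in range(1, len(words)) if words[i-1][-1] != words[i][0]]
--     dups = [i for i in range(1, len(words)) if words[i] in words[:i]]
--     bad = min(breaks + dups, default=None)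
--     if bad is None:
--         return [0, 0]
--     return [bad % n + 1, bad // n + 1]
-- ===== Notes on version B (the rewrite author's own statement) =====
-- stated objective: alternative
-- what changed: Replaces A's single early-terminating pass with a growing seen-set by a collect-then-select algorithm: build the full list of chain-break indices and the full list of repeated-word indices as two independent comprehensions, then take the minimum index (or none) and apply the position formula once.
-- outside the precondition, e.g. on solution(0, ['a']): A returns [0, 0], B returns [0, 0]; on solution(2, ['ab', 'ca', '']): A returns [2, 1], B raises IndexError
import Mathlib
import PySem

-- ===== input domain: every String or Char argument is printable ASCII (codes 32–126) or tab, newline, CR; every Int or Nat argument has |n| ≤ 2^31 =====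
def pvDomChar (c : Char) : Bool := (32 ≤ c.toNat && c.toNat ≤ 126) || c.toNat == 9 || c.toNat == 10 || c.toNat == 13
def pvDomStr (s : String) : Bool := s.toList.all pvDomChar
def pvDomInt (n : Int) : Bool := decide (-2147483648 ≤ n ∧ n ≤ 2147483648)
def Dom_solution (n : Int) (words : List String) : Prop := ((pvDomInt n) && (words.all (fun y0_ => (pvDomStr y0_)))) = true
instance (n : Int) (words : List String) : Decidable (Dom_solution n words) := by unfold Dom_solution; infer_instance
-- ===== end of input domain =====

-- B replaces A's single early-terminating pass with a growing seen-set by a collect-then-select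
-- algorithm: two independent index comprehensions (chain breaks / repeats) followed by min ("alternative").

-- ===== PORT A =====
-- the for-loop over range(len(words)) with early return, carrying the set `st`
def solutionGo (n : Int) (words : List String) (st : PySem.Set String) : List Int → List Int
  | [] => [0, 0]
  | index :: rest =>
    if index = 0 then
      solutionGo n words (PySem.Set.add st (PySem.List.pyGetD words index "")) rest
    else if PySem.Str.pyGet? (PySem.List.pyGetD words (index - 1) "") (-1) =
              PySem.Str.pyGet? (PySem.List.pyGetD words index "") 0 ∧
            (PySem.List.pyGetD words index "") ∉ st then
      solutionGo n words (PySem.Set.add st (PySem.List.pyGetD words index "")) rest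
    else
      [PySem.Int.mod index n + 1, PySem.Int.floordiv index n + 1]

def solution (n : Int) (words : List String) : List Int :=
  solutionGo n words PySem.Set.empty (PySem.List.pyRange 0 (words.length : Int) 1)

-- ===== PORT B =====
def solution_alt (n : Int) (words : List String) : List Int :=
  let breaks := (PySem.List.pyRange 1 (words.length : Int) 1).filter
    (fun i => decide (PySem.Str.pyGet? (PySem.List.pyGetD words (i - 1) "") (-1) ≠
                      PySem.Str.pyGet? (PySem.List.pyGetD words i "") 0))
  let dups := (PySem.List.pyRange 1 (words.length : Int) 1).filter
    (fun i => (PySem.List.slice words none (some i)).contains (PySem.List.pyGetD words i ""))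
  match PySem.List.min? (breaks ++ dups) (fun x => x) with
  | none => [0, 0]
  | some bad => [PySem.Int.mod bad n + 1, PySem.Int.floordiv bad n + 1]

-- ===== PRECONDITION & SPEC =====
-- Pre_ excludes n = 0 (the % n / // n in the result expression raises ZeroDivisionError when a
-- violation occurs) and empty-string words (words[i][-1] / words[i][0] raises IndexError, in A once
-- the loop reaches them, in B while building the comprehensions); it keeps the natural domain of the
-- game: a nonzero player count and nonempty words.
def Pre_solution (n : Int) (words : List String) : Prop :=
  n ≠ 0 ∧ ∀ w ∈ words, w ≠ ""
instance (n : Int) (words : List String) : Decidable (Pre_solution n words) := by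
  unfold Pre_solution; infer_instance

def pvWitness_solution : Int × List String := (2, ["ab", "ba", "ac"])

def Spec_solution (n : Int) (words : List String) (out : List Int) : Prop := out = solution_alt n words
instance (n : Int) (words : List String) (out : List Int) : Decidable (Spec_solution n words out) := by unfold Spec_solution; infer_instance

-- ===== CLAIM (what is proved, stated in full; the proofs are below) =====
def Claim_equal_solution : Prop := ∀ (n : Int) (words : List String), Dom_solution n words → Pre_solution n words → Spec_solution n words (solution n words)

-- ===== LEMMAS AND PROOFS =====

-- the two predicates of B's comprehensions (proof-side names; definitionally the lambdas in the port)
def pBreak (words : List String) (i : Int) : Bool :=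
  decide (PySem.Str.pyGet? (PySem.List.pyGetD words (i - 1) "") (-1) ≠
          PySem.Str.pyGet? (PySem.List.pyGetD words i "") 0)
def pDup (words : List String) (i : Int) : Bool :=
  (PySem.List.slice words none (some i)).contains (PySem.List.pyGetD words i "")

-- a fold with step f keeps an accumulator no larger than everything still to come
lemma foldl_keep (f : Option Int → Int → Option Int) (x : Int)
    (hf : ∀ v, x ≤ v → f (some x) v = some x) :
    ∀ (l : List Int), (∀ y ∈ l, x ≤ y) → l.foldl f (some x) = some x := by
  intro l
  induction l with
  | nil => intro _; rfl
  | cons a t ih =>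
    intro h
    rw [List.foldl_cons, hf a (h a List.mem_cons_self)]
    exact ih (fun y hy => h y (List.mem_cons_of_mem _ hy))

-- min? of a list whose element x beats everything before it strictly and everything after it weakly
lemma min?_append_mid (l1 : List Int) (x : Int) (l2 : List Int)
    (h1 : ∀ y ∈ l1, x < y) (h2 : ∀ y ∈ l2, x ≤ y) :
    PySem.List.min? (l1 ++ x :: l2) (fun v => v) = some x := by
  have hstep : ∀ v, x ≤ v →
      (fun (acc : Option Int) (w : Int) =>
        match acc with
        | none => some w
        | some m => if w < m then some w else some m) (some x) v = some x := by
    intro v hv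
    show (if v < x then some v else some x) = some x
    rw [if_neg (not_lt.mpr hv)]
  rcases hmin : PySem.List.min? l1 (fun v : Int => v) with _ | m
  · unfold PySem.List.min? at hmin ⊢
    rw [List.foldl_append, hmin, List.foldl_cons]
    exact foldl_keep _ x hstep l2 h2
  · have hmem : m ∈ l1 := PySem.List.min?_mem hmin
    have hxm : x < m := h1 m hmem
    unfold PySem.List.min? at hmin ⊢
    rw [List.foldl_append, hmin, List.foldl_cons]
    show List.foldl _ (if x < m then some x else some m) l2 = some x
    rw [if_pos hxm]
    exact foldl_keep _ x hstep l2 h2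

-- min of the two comprehensions = first index satisfying either predicate, on a strictly sorted range
lemma min?_two_filters' (p q : Int → Bool) : ∀ (r : List Int), r.Pairwise (· < ·) →
    PySem.List.min? (r.filter p ++ r.filter q) (fun x => x) =
      (r.filter (fun i => p i || q i)).head? := by
  intro r
  induction r with
  | nil => intro _; rfl
  | cons a t ih =>
    intro h
    rcases List.pairwise_cons.mp h with ⟨ha, ht⟩
    by_cases hp : p a = true
    · have h1 : (a :: t).filter p = a :: t.filter p := by simp [hp]
      have hhead : (a :: t).filter (fun i => p i || q i) = a :: t.filter (fun i => p i || q i) := by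
        simp [hp]
      rw [h1, hhead, List.cons_append]
      rw [show a :: (t.filter p ++ (a :: t).filter q) = [] ++ a :: (t.filter p ++ (a :: t).filter q) from rfl]
      rw [min?_append_mid [] a _ (by simp) (by
        intro y hy
        rcases List.mem_append.mp hy with hy | hy
        · exact le_of_lt (ha y (List.mem_filter.mp hy).1)
        · rcases List.mem_cons.mp (List.mem_filter.mp hy).1 with h | h
          · exact le_of_eq h.symm
          · exact le_of_lt (ha y h))]
      rfl
    · by_cases hq : q a = true
      · have h1 : (a :: t).filter p = t.filter p := by simp [hp]
        have h2 : (a :: t).filter q = a :: t.filter q := by simp [hq]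
        have hhead : (a :: t).filter (fun i => p i || q i) = a :: t.filter (fun i => p i || q i) := by
          simp [hq]
        rw [h1, h2, hhead]
        rw [min?_append_mid (t.filter p) a (t.filter q)
          (fun y hy => ha y (List.mem_filter.mp hy).1)
          (fun y hy => le_of_lt (ha y (List.mem_filter.mp hy).1))]
        rfl
      · have h1 : (a :: t).filter p = t.filter p := by simp [hp]
        have h2 : (a :: t).filter q = t.filter q := by simp [hq]
        have hhead : (a :: t).filter (fun i => p i || q i) = t.filter (fun i => p i || q i) := by
          simp [hp, hq]
        rw [h1, h2, hhead]
        exact ih ht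

-- membership in a prefix, as B's dup predicate sees it
lemma pDup_iff_mem_take (words : List String) (i : Nat) :
    pDup words (i : Int) = true ↔ PySem.List.pyGetD words (i : Int) "" ∈ words.take i := by
  unfold pDup
  rw [PySem.List.slice_to_natCast]
  exact List.contains_iff_mem

-- A's loop from index i (i ≥ 1), with st = the words before i, returns according to the FIRST
-- index ≥ i at which either predicate fires
lemma main_loop (n : Int) (words : List String) :
    ∀ (k i : Nat), i + k = words.length → 1 ≤ i →
    ∀ (st : PySem.Set String), (∀ w, w ∈ st ↔ w ∈ words.take i) →
    solutionGo n words st (PySem.List.pyRange (i : Int) (words.length : Int) 1) =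
      match ((PySem.List.pyRange (i : Int) (words.length : Int) 1).filter
          (fun j => pBreak words j || pDup words j)).head? with
      | none => [0, 0]
      | some bad => [PySem.Int.mod bad n + 1, PySem.Int.floordiv bad n + 1] := by
  intro k
  induction k with
  | zero =>
    intro i hlen h1 st hst
    rw [PySem.List.pyRange_one_eq_nil (by omega)]
    rfl
  | succ k ih =>
    intro i hlen h1 st hst
    have hi : i < words.length := by omega
    rw [PySem.List.pyRange_one_cons (by exact_mod_cast hi)]
    have hne0 : ¬ ((i : Int) = 0) := by omega
    have hmemiff : pDup words (i : Int) = true ↔ PySem.List.pyGetD words (i : Int) "" ∈ st := by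
      rw [pDup_iff_mem_take, hst]
    simp only [solutionGo, List.filter_cons, hne0, if_false]
    by_cases hXY : PySem.Str.pyGet? (PySem.List.pyGetD words ((i : Int) - 1) "") (-1) =
        PySem.Str.pyGet? (PySem.List.pyGetD words (i : Int) "") 0
    · have hpb : pBreak words (i : Int) = false := by
        unfold pBreak; simp only [ne_eq, hXY, not_true_eq_false, decide_false]
      by_cases hmem : PySem.List.pyGetD words (i : Int) "" ∈ st
      · -- repeated word: A returns the pair; the filter keeps i in front
        have hpd : pDup words (i : Int) = true := hmemiff.mpr hmem
        rw [if_neg (fun hc => hc.2 hmem)]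
        simp [hpb, hpd]
      · -- valid step: A recurses; the filter drops i
        have hpd : pDup words (i : Int) = false := by
          rcases h : pDup words (i : Int) with _ | _
          · rfl
          · exact absurd (hmemiff.mp h) hmem
        rw [if_pos ⟨hXY, hmem⟩]
        simp only [hpb, hpd, Bool.or_false, Bool.false_eq_true, if_false]
        have hrec := ih (i + 1) (by omega) (by omega)
          (PySem.Set.add st (PySem.List.pyGetD words (i : Int) "")) (by
            intro w
            have hcur : PySem.List.pyGetD words (i : Int) "" = words[i] := by
              rw [PySem.List.pyGetD_natCast]
              exact List.getD_eq_getElem words "" hi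
            rw [PySem.Set.mem_add, hst, hcur, List.take_add_one, List.getElem?_eq_getElem hi]
            simp only [List.mem_append, Option.toList_some, List.mem_singleton])
        have hcast : ((i + 1 : Nat) : Int) = (i : Int) + 1 := by push_cast; ring
        rw [hcast] at hrec
        exact hrec
    · -- chain break: A returns the pair; the filter keeps i in front
      have hpb : pBreak words (i : Int) = true := by
        unfold pBreak; simp only [ne_eq, hXY, not_false_eq_true, decide_true]
      rw [if_neg (fun hc => hXY hc.1)]
      simp [hpb]

-- ===== VERDICT (by name: the statement is the Claim_ definition above) =====
theorem solution_spec : Claim_equal_solution := by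
  intro n words _ _
  unfold Spec_solution solution
  simp only [solution_alt]
  rw [show (fun i : Int => decide (PySem.Str.pyGet? (PySem.List.pyGetD words (i - 1) "") (-1) ≠
        PySem.Str.pyGet? (PySem.List.pyGetD words i "") 0)) = pBreak words from rfl,
    show (fun i : Int => (PySem.List.slice words none (some i)).contains
        (PySem.List.pyGetD words i "")) = pDup words from rfl,
    min?_two_filters' (pBreak words) (pDup words) _ (PySem.List.pairwise_lt_pyRange_one _ _)]
  by_cases h0 : words.length = 0
  · rw [PySem.List.pyRange_one_eq_nil (by omega), PySem.List.pyRange_one_eq_nil (by omega)]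
    rfl
  · have h1 : 0 < words.length := by omega
    rw [show ((0 : Int)) = ((0 : Nat) : Int) by rfl,
      PySem.List.pyRange_one_cons (by exact_mod_cast h1)]
    simp only [solutionGo]
    have hrec := main_loop n words (words.length - 1) 1 (by omega) (by omega)
      (PySem.Set.add PySem.Set.empty (PySem.List.pyGetD words 0 "")) (by
        intro w
        rw [List.take_add_one, List.getElem?_eq_getElem h1]
        simp [PySem.Set.empty, PySem.List.pyGetD_zero, List.getElem?_eq_getElem h1])
    have hcast : ((1 : Nat) : Int) = ((0 : Nat) : Int) + 1 := by norm_num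
    rw [hcast] at hrec
    exact hrec
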